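-- pv_equiv track=rewrite | github.com/ASSERT-KTH/Mokav | experiments/pynguin/c4b/return-lst/generated_tests/src_954/5/src_954.py | func
-- ===== SOURCE A (Python) =====
-- def func(*args):
-- 	ret_values = []
--
-- 	x = int(args[0])
-- 	str = ''
-- 	for i in range(x):
-- 	    if ((i % 2) == 0):
-- 	        str += 'I hate'
-- 	    else:
-- 	        str += 'I love'
-- 	    if (i == (x - 1)):
-- 	        str += ' it'
-- 	    else:
-- 	        str += ' that '
-- 	ret_values.append(str)
--
-- 	return ret_values
-- ===== SOURCE B (Python) =====
-- def func(*args):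
--     x = int(args[0])
--     if x <= 0:
--         return ['']
--     s = 'I hate that I love that ' * ((x + 1) // 2)
--     return [s[:12 * x - 6] + ' it']
-- ===== Notes on version B (the rewrite author's own statement) =====
-- stated objective: alternative
-- what changed: Replace the per-iteration loop with its branch on the last index by one repetition of the two-phrase period string, sliced to the needed length and terminated with a single ' it'.
import Mathlib
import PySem

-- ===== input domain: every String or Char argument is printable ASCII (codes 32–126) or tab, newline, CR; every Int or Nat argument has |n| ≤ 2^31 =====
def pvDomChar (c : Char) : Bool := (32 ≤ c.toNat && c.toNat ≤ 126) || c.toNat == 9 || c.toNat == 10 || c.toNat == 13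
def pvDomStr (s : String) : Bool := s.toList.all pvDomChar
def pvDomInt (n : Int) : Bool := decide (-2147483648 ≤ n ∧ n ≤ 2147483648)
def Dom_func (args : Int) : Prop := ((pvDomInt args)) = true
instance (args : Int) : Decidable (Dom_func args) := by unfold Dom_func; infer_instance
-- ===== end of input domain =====

-- B replaces A's per-iteration loop (with its branch on the last index) by repeating the
-- period string "I hate that I love that ", slicing it to the needed length and appending
-- " it" once: a different algorithm of the same cost.

-- ===== PORT A =====
def func (args : Int) : List String :=
  let x := args
  let s := (PySem.List.pyRange 0 x 1).foldl (fun str i =>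
    let str := str ++ (if i % 2 == 0 then "I hate" else "I love")
    if i == x - 1 then str ++ " it" else str ++ " that ") ""
  [s]

-- ===== PORT B =====
def func_alt (args : Int) : List String :=
  let x := args
  if x ≤ 0 then [""]
  else
    -- 'I hate that I love that ' * ((x + 1) // 2)  (str * int, exact)
    let s := String.ofList
      (PySem.List.pyRepeat "I hate that I love that ".toList (PySem.Int.floordiv (x + 1) 2))
    [PySem.Str.slice s none (some (12 * x - 6)) ++ " it"]

-- ===== PRECONDITION & SPEC =====
def Spec_func (args : Int) (out : List String) : Prop := out = func_alt args
instance (args : Int) (out : List String) : Decidable (Spec_func args out) := by unfold Spec_func; infer_instance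

-- ===== CLAIM (what is proved, stated in full; the proofs are below) =====
def Claim_equal_func : Prop := ∀ (args : Int), Dom_func args → Spec_func args (func args)

-- ===== LEMMAS AND PROOFS =====

-- the phrase chosen at index i
def pvG (i : Int) : String := if i % 2 == 0 then "I hate" else "I love"

-- the characters A has accumulated after n full iterations that all take the " that " branch
def pvT : Nat → List Char
  | 0 => []
  | n + 1 => pvT n ++ (pvG (n : Int)).toList ++ (" that ").toList

def pvUnit : List Char := "I hate that I love that ".toList

theorem pvG_strlen (i : Int) : (pvG i).length = 6 := by
  unfold pvG; split <;> decide

theorem pvG_even (i : Int) (h : i % 2 = 0) : pvG i = "I hate" := by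
  simp [pvG, h]

theorem pvG_odd (i : Int) (h : i % 2 = 1) : pvG i = "I love" := by
  simp [pvG, h]

theorem pvT_len (n : Nat) : (pvT n).length = 12 * n := by
  induction n with
  | zero => rfl
  | succ n ih => simp [pvT, ih, pvG_strlen]; omega

theorem pvT_two_mul (m : Nat) : pvT (2 * m) = (List.replicate m pvUnit).flatten := by
  induction m with
  | zero => rfl
  | succ m ih =>
    have h2 : 2 * (m + 1) = (2 * m + 1) + 1 := by omega
    rw [h2]
    have he : ((2 * m : Nat) : Int) % 2 = 0 := by push_cast; omega
    have ho : ((2 * m + 1 : Nat) : Int) % 2 = 1 := by push_cast; omega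
    simp only [pvT, ih, pvG_even _ he, pvG_odd _ ho, List.replicate_succ', List.flatten_append]
    simp [pvUnit]

theorem pvT_prefix : ∀ (b a : Nat), a ≤ b → ∃ r, pvT b = pvT a ++ r := by
  intro b
  induction b with
  | zero =>
    intro a h
    have : a = 0 := Nat.le_zero.mp h
    subst this; exact ⟨[], by simp [pvT]⟩
  | succ b ih =>
    intro a h
    by_cases ha : a = b + 1
    · subst ha; exact ⟨[], by simp⟩
    · obtain ⟨r, hr⟩ := ih a (by omega)
      exact ⟨r ++ (pvG (b : Int)).toList ++ (" that ").toList, by simp [pvT, hr]⟩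

-- A's fold takes the " that " branch on every element different from l
theorem pv_fold_noLast (l : Int) (L : List Int) (h : ∀ i ∈ L, i ≠ l) (acc : String) :
    L.foldl (fun str i =>
      let str := str ++ (if i % 2 == 0 then "I hate" else "I love")
      if i == l then str ++ " it" else str ++ " that ") acc
    = L.foldl (fun str i => str ++ pvG i ++ " that ") acc := by
  induction L generalizing acc with
  | nil => rfl
  | cons a L ih =>
    have ha : a ≠ l := h a (List.mem_cons_self)
    simp only [List.foldl_cons]
    rw [ih (fun i hi => h i (List.mem_cons_of_mem _ hi))]
    simp [pvG, ha, String.append_assoc]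

-- the simple fold over range(m) accumulates exactly the characters pvT m
theorem pv_fold_T (m : Nat) : ∀ acc : String,
    ((PySem.List.pyRange 0 (m : Int) 1).foldl
      (fun str i => str ++ pvG i ++ " that ") acc).toList
    = acc.toList ++ pvT m := by
  induction m with
  | zero =>
    intro acc
    rw [PySem.List.pyRange_one_eq_nil (by omega)]
    simp [pvT]
  | succ m ih =>
    intro acc
    have hc : ((m + 1 : Nat) : Int) = (m : Int) + 1 := by push_cast; ring
    rw [hc, PySem.List.pyRange_one_succ_right (by positivity)]
    simp only [List.foldl_append, List.foldl_cons, List.foldl_nil]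
    simp [ih, pvT]

-- ===== VERDICT (by name: the statement is the Claim_ definition above) =====
theorem func_spec : Claim_equal_func := by
  intro args _
  unfold Spec_func func func_alt
  dsimp only
  by_cases hx : args ≤ 0
  · rw [PySem.List.pyRange_one_eq_nil hx, if_pos hx]
    rfl
  · rw [if_neg hx]
    have hx1 : 0 < args := by omega
    set n : Nat := (args - 1).toNat with hn
    have hargs : args = (n : Int) + 1 := by
      have := Int.toNat_of_nonneg (a := args - 1) (by omega)
      omega
    -- A side: split off the last index
    have hsplit : PySem.List.pyRange 0 args 1
        = PySem.List.pyRange 0 (args - 1) 1 ++ [args - 1] := by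
      have := PySem.List.pyRange_one_succ_right (a := 0) (b := args - 1) (by omega)
      simpa using this
    rw [hsplit]
    have hne : ∀ i ∈ PySem.List.pyRange 0 (args - 1) 1, i ≠ args - 1 := by
      intro i hi
      have := (PySem.List.mem_pyRange_one).mp hi
      omega
    simp only [List.foldl_append, List.foldl_cons, List.foldl_nil]
    rw [pv_fold_noLast (args - 1) _ hne]
    simp only [beq_self_eq_true, if_true]
    -- reduce to equality of the two strings, then of their character lists
    simp only [List.cons.injEq, and_true]
    refine String.toList_inj.mp ?_
    have hm : args - 1 = (n : Int) := by omega
    have hA := pv_fold_T n ""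
    rw [hm] at *
    -- B side: the repeated period, cut to length 12*n+6
    have hk : PySem.Int.floordiv (args + 1) 2 = (((n + 2) / 2 : Nat) : Int) := by
      rw [hargs]
      have : ((n : Int) + 1) + 1 = ((n + 2 : Nat) : Int) := by push_cast; ring
      rw [this]
      exact PySem.Int.floordiv_natCast (n + 2) 2
    have hb6 : (0 : Int) ≤ 12 * args - 6 := by omega
    have hb6' : (12 * args - 6).toNat = 12 * n + 6 := by omega
    rw [hk]
    simp only [String.toList_append, PySem.Str.toList_slice, String.toList_ofList,
      PySem.Chars.slice_eq_listSlice, PySem.List.slice_to _ hb6, hb6',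
      PySem.List.pyRepeat, Int.toNat_natCast]
    -- the repeated period is pvT of an even length ≥ n+1
    rw [show ("I hate that I love that ".toList) = pvUnit from rfl, ← pvT_two_mul]
    obtain ⟨r, hr⟩ := pvT_prefix (2 * ((n + 2) / 2)) (n + 1) (by omega)
    rw [hr]
    have hshape : pvT (n + 1) ++ r
        = (pvT n ++ (pvG (n : Int)).toList) ++ ((" that ").toList ++ r) := by
      simp [pvT]
    rw [hshape, List.take_left' (by simp [pvT_len, pvG_strlen])]
    rw [show (if ((n : Int) % 2 == 0) = true then ("I hate" : String) else "I love")
        = pvG (n : Int) from rfl, hA]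
    simp
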